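-- pv_equiv track=rewrite | github.com/MinseokGo/problem-solve | 이재훈/프로그래머스/Lv2/더맵게.py | solution
-- ===== SOURCE A (Python) =====
-- from collections import deque
--
-- def solution(scoville, K):
--     answer = 0
--     scoville = deque(scoville)
--
--     while scoville:
--         s = scoville.popleft()
--         if s>=K:
--             break
--         else:
--             if scoville:
--                 s2 = scoville.popleft()
--             else:
--                 answer = -1
--                 break
--         scoville.appendleft(s+s2*2)
--         answer+=1
--
--
--     return answer
-- ===== SOURCE B (Python) =====
-- def solution(scoville, K):
--     # Accumulator re-formulation: the combined front element is a running
--     # accumulator; no deque, no mutation of the argument.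
--     if not scoville:
--         return 0
--     acc = scoville[0]
--     answer = 0
--     i = 1
--     while acc < K:
--         if i < len(scoville):
--             acc += 2 * scoville[i]
--             i += 1
--             answer += 1
--         else:
--             return -1
--     return answer
-- ===== Notes on version B (the rewrite author's own statement) =====
-- stated objective: simpler
-- what changed: Replaces the deque popleft/appendleft re-queue cycle with a plain index loop keeping the combined front element as a running accumulator; the argument is no longer mutated.
import Mathlib
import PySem

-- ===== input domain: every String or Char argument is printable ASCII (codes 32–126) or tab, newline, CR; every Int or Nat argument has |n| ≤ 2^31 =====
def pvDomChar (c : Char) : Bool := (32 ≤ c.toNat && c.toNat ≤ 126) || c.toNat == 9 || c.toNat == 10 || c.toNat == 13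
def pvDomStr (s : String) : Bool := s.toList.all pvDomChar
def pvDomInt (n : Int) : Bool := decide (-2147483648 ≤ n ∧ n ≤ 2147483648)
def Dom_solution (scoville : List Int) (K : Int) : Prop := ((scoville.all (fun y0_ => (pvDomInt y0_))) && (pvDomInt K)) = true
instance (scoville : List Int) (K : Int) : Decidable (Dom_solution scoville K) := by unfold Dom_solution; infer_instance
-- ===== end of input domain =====

-- B replaces A's deque popleft/appendleft re-queue cycle with an accumulator index loop (simpler; return value only — A mutates no caller-visible state since deque(scoville) copies).

-- ===== PORT A =====
-- A's while loop over the deque: pop s; if s >= K stop; pop s2 (or answer = -1 if empty); push back s + s2*2; answer += 1.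
def solutionLoop (dq : List Int) (answer : Int) (K : Int) : Int :=
  match dq with
  | [] => answer
  | s :: rest =>
    if s ≥ K then answer
    else
      match rest with
      | [] => -1
      | s2 :: rest2 => solutionLoop ((s + s2 * 2) :: rest2) (answer + 1) K
termination_by dq.length
decreasing_by simp

def solution (scoville : List Int) (K : Int) : Int :=
  solutionLoop scoville 0 K

-- ===== PORT B =====
-- B's while loop: acc is the combined front element, walking the tail of the list.
def solutionAltLoop (acc : Int) (rest : List Int) (answer : Int) (K : Int) : Int :=
  if acc ≥ K then answer
  else
    match rest with
    | [] => -1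
    | x :: xs => solutionAltLoop (acc + 2 * x) xs (answer + 1) K

def solution_alt (scoville : List Int) (K : Int) : Int :=
  match scoville with
  | [] => 0
  | a :: rest => solutionAltLoop a rest 0 K

-- ===== PRECONDITION & SPEC =====
def Spec_solution (scoville : List Int) (K : Int) (out : Int) : Prop := out = solution_alt scoville K
instance (scoville : List Int) (K : Int) (out : Int) : Decidable (Spec_solution scoville K out) := by unfold Spec_solution; infer_instance

-- ===== CLAIM (what is proved, stated in full; the proofs are below) =====
def Claim_equal_solution : Prop := ∀ (scoville : List Int) (K : Int), Dom_solution scoville K → Spec_solution scoville K (solution scoville K)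

-- ===== LEMMAS AND PROOFS =====
theorem solutionLoop_eq_alt (rest : List Int) (a ans K : Int) :
    solutionLoop (a :: rest) ans K = solutionAltLoop a rest ans K := by
  induction rest generalizing a ans with
  | nil =>
    rw [solutionLoop, solutionAltLoop]
  | cons x xs ih =>
    rw [solutionLoop, solutionAltLoop]
    by_cases h : a ≥ K
    · simp [h]
    · simp only [h, if_false]
      have : a + x * 2 = a + 2 * x := by ring
      rw [this, ih]

-- ===== VERDICT (by name: the statement is the Claim_ definition above) =====
theorem solution_spec : Claim_equal_solution := by
  intro scoville K _
  unfold Spec_solution solution solution_alt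
  match scoville with
  | [] => rw [solutionLoop]
  | a :: rest => exact solutionLoop_eq_alt rest a 0 K
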